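-- pv_equiv track=rewrite | github.com/pypi-data/pypi-mirror-111 | packages/vdr/vdr-1.0.5-py3-none-any.whl/vdr/sentences.py | SBS
-- ===== SOURCE A (Python) =====
-- def checksum(sentence):
--     checksum = 0
--     for el in sentence[1:]:
--         checksum ^= ord(el)
--     return "*" + str(format(checksum, 'x'))
--
-- def SBS(id, capacity, level, quantity):
--     """Safety Ballast System"""
--     fields = (
--         ("Ballast ID", id),
--         ("Ballast capacity", capacity),
--         ("Ballast level", level),
--         ("Ballast quantity", quantity)
--     )
--
--     sentence = "$PFSBS,"
--     for i in fields:
--         sentence += str(i[1]) + ","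
--
--     return sentence + checksum(sentence) + "\t\n"
-- ===== SOURCE B (Python) =====
-- def SBS(id, capacity, level, quantity):
--     """Safety Ballast System"""
--     acc = 0
--     for ch in "PFSBS,":
--         acc ^= ord(ch)
--     sentence = "$PFSBS,"
--     for value in (id, capacity, level, quantity):
--         field = str(value) + ","
--         sentence += field
--         for ch in field:
--             acc ^= ord(ch)
--     return sentence + "*" + format(acc, "x") + "\t\n"
-- ===== Notes on version B (the rewrite author's own statement) =====
-- stated objective: alternative
-- what changed: B fuses sentence building and checksum into one pass over the fields (XOR accumulated as each field string is produced), instead of A's build-then-rescan of sentence[1:] via a separate checksum helper.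
import Mathlib
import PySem

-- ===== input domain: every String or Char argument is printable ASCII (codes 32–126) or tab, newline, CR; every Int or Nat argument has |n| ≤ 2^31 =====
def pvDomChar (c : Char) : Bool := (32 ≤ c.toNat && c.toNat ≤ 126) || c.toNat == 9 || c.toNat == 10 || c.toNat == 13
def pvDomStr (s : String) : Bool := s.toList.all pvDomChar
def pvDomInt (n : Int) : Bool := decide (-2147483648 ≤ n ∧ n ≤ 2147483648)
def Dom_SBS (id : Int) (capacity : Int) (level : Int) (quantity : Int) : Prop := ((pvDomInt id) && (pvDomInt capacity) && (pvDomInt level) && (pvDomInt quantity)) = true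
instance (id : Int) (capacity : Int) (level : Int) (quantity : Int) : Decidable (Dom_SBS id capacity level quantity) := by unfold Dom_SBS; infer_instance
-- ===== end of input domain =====

-- B fuses sentence building and checksum accumulation into one pass over the fields, instead of A's build-then-rescan (alternative decomposition, same cost).


-- format(n,'x') for a nonnegative n, hand-ported (PySem has no hex formatter): lowercase hex digits, no padding; exact for n : Nat.
def hexDigit (n : Nat) : Char := if n < 10 then Char.ofNat (48 + n) else Char.ofNat (87 + n)

def hexChars (n : Nat) : List Char :=
  if _h : n < 16 then [hexDigit n]
  else hexChars (n / 16) ++ [hexDigit (n % 16)]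
decreasing_by exact Nat.div_lt_self (by omega) (by omega)

-- ===== PORT A =====
-- checksum(sentence): XOR of ord over sentence[1:] (slice [1:] on a string = drop 1, exact), then "*" + format(c,'x').
def checksumA (sentence : String) : String :=
  let c := (sentence.toList.drop 1).foldl (fun a el => a ^^^ el.toNat) 0
  "*" ++ String.ofList (hexChars c)

def SBS (id : Int) (capacity : Int) (level : Int) (quantity : Int) : String :=
  let fields : List (String × Int) :=
    [("Ballast ID", id), ("Ballast capacity", capacity),
     ("Ballast level", level), ("Ballast quantity", quantity)]
  let sentence := fields.foldl (fun s i => s ++ PySem.Int.toStr i.2 ++ ",") "$PFSBS,"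
  sentence ++ checksumA sentence ++ "\t\n"

-- ===== PORT B =====
def SBS_alt (id : Int) (capacity : Int) (level : Int) (quantity : Int) : String :=
  let acc0 := "PFSBS,".toList.foldl (fun a ch => a ^^^ ch.toNat) 0
  let st := [id, capacity, level, quantity].foldl
    (fun (st : String × Nat) v =>
      let field := PySem.Int.toStr v ++ ","
      (st.1 ++ field, field.toList.foldl (fun a ch => a ^^^ ch.toNat) st.2))
    ("$PFSBS,", acc0)
  st.1 ++ "*" ++ String.ofList (hexChars st.2) ++ "\t\n"

-- ===== PRECONDITION & SPEC =====
def Spec_SBS (id : Int) (capacity : Int) (level : Int) (quantity : Int) (out : String) : Prop := out = SBS_alt id capacity level quantity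
instance (id : Int) (capacity : Int) (level : Int) (quantity : Int) (out : String) : Decidable (Spec_SBS id capacity level quantity out) := by unfold Spec_SBS; infer_instance

-- ===== CLAIM (what is proved, stated in full; the proofs are below) =====
def Claim_equal_SBS : Prop := ∀ (id : Int) (capacity : Int) (level : Int) (quantity : Int), Dom_SBS id capacity level quantity → Spec_SBS id capacity level quantity (SBS id capacity level quantity)

-- ===== LEMMAS AND PROOFS =====

theorem SBS_eq_alt (id capacity level quantity : Int) :
    SBS id capacity level quantity = SBS_alt id capacity level quantity := by
  simp [SBS, SBS_alt, checksumA, List.foldl, String.toList_append, List.foldl_append,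
        String.append_assoc]
  have h : ∀ t : String, "," ++ ("*" ++ t) = ",*" ++ t := by
    intro t; rw [← String.append_assoc]; rfl
  rw [h]

-- ===== VERDICT (by name: the statement is the Claim_ definition above) =====
theorem SBS_spec : Claim_equal_SBS := by
  intro id capacity level quantity _
  exact SBS_eq_alt id capacity level quantity
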